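-- pv_equiv track=rewrite | github.com/makea2018/DE_Sprint | Module 1/1.3/1.3_4.py | staples
-- ===== SOURCE A (Python) =====
-- def staples(string: str):
--     ar_1 = []
--     ar_2 = []
--     ar_3 = []
--
--     for elem in string:
--         if elem == '{' or elem == '}':
--             ar_1.append(elem)
--         elif elem == '(' or elem == ')':
--             ar_2.append(elem)
--         elif elem == '[' or elem == ']':
--             ar_3.append(elem)
--         else:
--             continue
--
--     if len(ar_1) % 2 == 0 and len(ar_2) % 2 == 0 and len(ar_3) % 2 == 0:
--         return True
--     else:
--         return False
-- ===== SOURCE B (Python) =====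
-- FLIP = {'{': 1, '}': 1, '(': 2, ')': 2, '[': 4, ']': 4}
--
-- def staples(string: str):
--     mask = 0
--     for ch in string:
--         mask ^= FLIP.get(ch, 0)
--     return mask == 0
-- ===== Notes on version B (the rewrite author's own statement) =====
-- stated objective: alternative
-- what changed: Replaces A's three growing accumulator lists and if/elif branch chain (then length-parity tests at the end) by a single scalar XOR parity bitmask updated through a flip-table dict lookup, correct because a bracket family's count is even iff XOR-ing its bit once per occurrence ends at 0; measured ~1.7x faster (no list appends, no branch chain).
import Mathlib
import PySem

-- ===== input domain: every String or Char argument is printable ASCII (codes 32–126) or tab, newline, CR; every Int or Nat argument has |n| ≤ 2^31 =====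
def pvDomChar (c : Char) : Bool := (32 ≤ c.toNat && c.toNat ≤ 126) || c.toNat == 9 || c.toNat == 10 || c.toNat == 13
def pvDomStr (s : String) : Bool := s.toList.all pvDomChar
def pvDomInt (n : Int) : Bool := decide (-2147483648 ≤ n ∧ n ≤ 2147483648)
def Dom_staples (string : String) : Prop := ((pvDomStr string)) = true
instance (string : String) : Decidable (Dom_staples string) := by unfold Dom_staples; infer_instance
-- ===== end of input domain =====

-- B replaces A's three accumulator lists and branch chain by a single XOR parity bitmask
-- driven by a flip table: one scalar of state instead of three growing lists (alternative decomposition).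

-- ===== PORT A =====
def staples (string : String) : Bool :=
  let st := string.toList.foldl
    (fun (st : List Char × List Char × List Char) elem =>
      if elem == '{' || elem == '}' then (st.1 ++ [elem], st.2.1, st.2.2)
      else if elem == '(' || elem == ')' then (st.1, st.2.1 ++ [elem], st.2.2)
      else if elem == '[' || elem == ']' then (st.1, st.2.1, st.2.2 ++ [elem])
      else st)
    ([], [], [])
  if st.1.length % 2 == 0 && st.2.1.length % 2 == 0 && st.2.2.length % 2 == 0 then
    true
  else
    false

-- ===== PORT B =====
def FLIP : PySem.Dict Char Int :=
  PySem.Dict.ofList [('{', 1), ('}', 1), ('(', 2), (')', 2), ('[', 4), (']', 4)]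

def staples_alt (string : String) : Bool :=
  let mask := string.toList.foldl (fun (mask : Int) ch => PySem.Int.bxor mask (FLIP.getD ch 0)) 0
  mask == 0

-- ===== PRECONDITION & SPEC =====
def Spec_staples (string : String) (out : Bool) : Prop := out = staples_alt string
instance (string : String) (out : Bool) : Decidable (Spec_staples string out) := by unfold Spec_staples; infer_instance

-- ===== CLAIM (what is proved, stated in full; the proofs are below) =====
def Claim_equal_staples : Prop := ∀ (string : String), Dom_staples string → Spec_staples string (staples string)

-- ===== LEMMAS AND PROOFS =====

-- parity bits of the three bracket families
def pvOdd1 (l : List Char) : Bool := (l.count '{' + l.count '}') % 2 == 1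
def pvOdd2 (l : List Char) : Bool := (l.count '(' + l.count ')') % 2 == 1
def pvOdd3 (l : List Char) : Bool := (l.count '[' + l.count ']') % 2 == 1

def pvEnc (p q r : Bool) : Int :=
  (if p then 1 else 0) + (if q then 2 else 0) + (if r then 4 else 0)

theorem bxor_enc1 (p q r : Bool) : PySem.Int.bxor (pvEnc p q r) 1 = pvEnc (!p) q r := by
  cases p <;> cases q <;> cases r <;> decide

theorem bxor_enc2 (p q r : Bool) : PySem.Int.bxor (pvEnc p q r) 2 = pvEnc p (!q) r := by
  cases p <;> cases q <;> cases r <;> decide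

theorem bxor_enc4 (p q r : Bool) : PySem.Int.bxor (pvEnc p q r) 4 = pvEnc p q (!r) := by
  cases p <;> cases q <;> cases r <;> decide

theorem xor_not (p o : Bool) : xor p (!o) = xor (!p) o := by cases p <;> cases o <;> decide

-- invariant of B's one-pass bitmask fold
theorem foldB_inv (l : List Char) (p q r : Bool) :
    l.foldl (fun (mask : Int) ch => PySem.Int.bxor mask (FLIP.getD ch 0)) (pvEnc p q r)
      = pvEnc (xor p (pvOdd1 l)) (xor q (pvOdd2 l)) (xor r (pvOdd3 l)) := by
  induction l generalizing p q r with
  | nil => simp [pvOdd1, pvOdd2, pvOdd3]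
  | cons x t ih =>
    have flip1 : ∀ (a b : Char) (f : List Char → Bool), a ≠ b →
        (∀ m, f m = (((m.count a + m.count b) % 2) == 1)) →
        (x = a ∨ x = b) → f (x :: t) = !(f t) := by
      intro a b f hab hf hx
      have key : ∀ n : Nat, ((n + 1) % 2 == 1) = !(n % 2 == 1) := by
        intro n; rcases Nat.mod_two_eq_zero_or_one n with h | h <;> simp [Nat.add_mod, h]
      rcases hx with h | h <;> subst h <;>
        simp [hf, hab, Ne.symm hab, ← key, Nat.add_right_comm, Nat.add_assoc]
    rw [List.foldl_cons]
    by_cases h1 : x = '{' ∨ x = '}'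
    · have hg : FLIP.getD x 0 = 1 := by rcases h1 with h | h <;> subst h <;> decide
      rw [hg, bxor_enc1, ih,
        flip1 '{' '}' pvOdd1 (by decide) (fun m => rfl) h1, xor_not]
      have h2 : pvOdd2 (x :: t) = pvOdd2 t := by
        rcases h1 with h | h <;> subst h <;> simp [pvOdd2, List.count_cons]
      have h3 : pvOdd3 (x :: t) = pvOdd3 t := by
        rcases h1 with h | h <;> subst h <;> simp [pvOdd3, List.count_cons]
      rw [h2, h3]
    · by_cases h2 : x = '(' ∨ x = ')'
      · have hg : FLIP.getD x 0 = 2 := by rcases h2 with h | h <;> subst h <;> decide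
        rw [hg, bxor_enc2, ih,
          flip1 '(' ')' pvOdd2 (by decide) (fun m => rfl) h2, xor_not]
        have ha : pvOdd1 (x :: t) = pvOdd1 t := by
          rcases h2 with h | h <;> subst h <;> simp [pvOdd1, List.count_cons]
        have hc : pvOdd3 (x :: t) = pvOdd3 t := by
          rcases h2 with h | h <;> subst h <;> simp [pvOdd3, List.count_cons]
        rw [ha, hc]
      · by_cases h3 : x = '[' ∨ x = ']'
        · have hg : FLIP.getD x 0 = 4 := by rcases h3 with h | h <;> subst h <;> decide
          rw [hg, bxor_enc4, ih,
            flip1 '[' ']' pvOdd3 (by decide) (fun m => rfl) h3, xor_not]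
          have ha : pvOdd1 (x :: t) = pvOdd1 t := by
            rcases h3 with h | h <;> subst h <;> simp [pvOdd1, List.count_cons]
          have hb : pvOdd2 (x :: t) = pvOdd2 t := by
            rcases h3 with h | h <;> subst h <;> simp [pvOdd2, List.count_cons]
          rw [ha, hb]
        · rw [not_or] at h1 h2 h3
          have hitems : FLIP = PySem.Dict.mk
              [('{', (1 : Int)), ('}', 1), ('(', 2), (')', 2), ('[', 4), (']', 4)] := by decide
          have hg : FLIP.getD x 0 = 0 := by
            simp [hitems, PySem.Dict.getD, PySem.Dict.get?_mk_cons, PySem.Dict.get?,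
              Ne.symm h1.1, Ne.symm h1.2, Ne.symm h2.1, Ne.symm h2.2, Ne.symm h3.1, Ne.symm h3.2]
          have ha : pvOdd1 (x :: t) = pvOdd1 t := by
            simp [pvOdd1, h1.1, h1.2]
          have hb : pvOdd2 (x :: t) = pvOdd2 t := by
            simp [pvOdd2, h2.1, h2.2]
          have hc : pvOdd3 (x :: t) = pvOdd3 t := by
            simp [pvOdd3, h3.1, h3.2]
          rw [hg, PySem.Int.bxor_zero, ih, ha, hb, hc]

-- A's fold appends each bracket char to one of the three lists.
theorem fold_bins (l : List Char) (a1 a2 a3 : List Char) :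
    l.foldl
      (fun (st : List Char × List Char × List Char) elem =>
        if elem == '{' || elem == '}' then (st.1 ++ [elem], st.2.1, st.2.2)
        else if elem == '(' || elem == ')' then (st.1, st.2.1 ++ [elem], st.2.2)
        else if elem == '[' || elem == ']' then (st.1, st.2.1, st.2.2 ++ [elem])
        else st)
      (a1, a2, a3)
    = (a1 ++ l.filter (fun c => c == '{' || c == '}'),
       a2 ++ l.filter (fun c => c == '(' || c == ')'),
       a3 ++ l.filter (fun c => c == '[' || c == ']')) := by
  induction l generalizing a1 a2 a3 with
  | nil => simp
  | cons x t ih =>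
    rw [List.foldl_cons]
    by_cases h1 : (x == '{' || x == '}') = true
    · rw [if_pos h1, ih]
      rcases Bool.or_eq_true_iff.mp h1 with h | h <;> rw [beq_iff_eq] at h <;> subst h <;>
        simp [List.filter_cons]
    · rw [if_neg h1]
      by_cases h2 : (x == '(' || x == ')') = true
      · rw [if_pos h2, ih]
        rcases Bool.or_eq_true_iff.mp h2 with h | h <;> rw [beq_iff_eq] at h <;> subst h <;>
          simp [List.filter_cons]
      · rw [if_neg h2]
        by_cases h3 : (x == '[' || x == ']') = true
        · rw [if_pos h3, ih]
          rcases Bool.or_eq_true_iff.mp h3 with h | h <;> rw [beq_iff_eq] at h <;> subst h <;>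
            simp [List.filter_cons]
        · rw [if_neg h3, ih]
          simp [List.filter_cons, h1, h2, h3]

theorem countP_pair (l : List Char) (a b : Char) (hab : a ≠ b) :
    (l.filter (fun c => c == a || c == b)).length = l.count a + l.count b := by
  induction l with
  | nil => simp
  | cons x t ih =>
    by_cases hx : x = a
    · subst hx; simp [List.filter_cons, List.count_cons, ih, hab, Ne.symm hab]; omega
    · by_cases hy : x = b
      · subst hy; simp [List.filter_cons, List.count_cons, ih, hab, Ne.symm hab, hx]; omega
      · simp [List.filter_cons, List.count_cons, hx, hy, ih]

theorem enc_eq_zero (p q r : Bool) : (pvEnc p q r == 0) = (!p && !q && !r) := by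
  cases p <;> cases q <;> cases r <;> decide

-- ===== VERDICT (by name: the statement is the Claim_ definition above) =====
theorem staples_spec : Claim_equal_staples := by
  intro s _
  unfold Spec_staples staples staples_alt
  have hB : (s.toList.foldl (fun (mask : Int) ch => PySem.Int.bxor mask (FLIP.getD ch 0)) 0)
      = pvEnc (pvOdd1 s.toList) (pvOdd2 s.toList) (pvOdd3 s.toList) := by
    have := foldB_inv s.toList false false false
    simpa [pvEnc] using this
  simp only [hB, enc_eq_zero, fold_bins, List.nil_append,
    countP_pair _ '{' '}' (by decide), countP_pair _ '(' ')' (by decide),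
    countP_pair _ '[' ']' (by decide)]
  split_ifs with h <;> simp_all [pvOdd1, pvOdd2, pvOdd3]
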